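-- pv_equiv track=rewrite | github.com/amsyskov/bci | EEG/EEG.py | get_patient_name
-- ===== SOURCE A (Python) =====
-- def get_patient_name(path):
--     slash=0
--     reverse_name=''
--     for i in range(len(path)-1,-1,-1):
--         if (path[i]=='/'):
--             slash+=1
--             continue
--         if (slash == 1):
--             reverse_name+=path[i]
--         if (slash == 2):
--             break
--     name=''
--     for i in range(len(reverse_name) - 1, -1, -1):
--         name+=reverse_name[i]
--     return name
-- ===== SOURCE B (Python) =====
-- def get_patient_name(path):
--     last = path.rfind('/')
--     if last == -1:
--         return ''
--     prev = path.rfind('/', 0, last)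
--     return path[prev + 1:last]
-- ===== Notes on version B (the rewrite author's own statement) =====
-- stated objective: faster
-- what changed: Replaces the char-by-char reverse scan with slash counting and the second string-reversal loop by two rfind calls that locate the last two slashes and one slice between them.
import Mathlib
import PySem

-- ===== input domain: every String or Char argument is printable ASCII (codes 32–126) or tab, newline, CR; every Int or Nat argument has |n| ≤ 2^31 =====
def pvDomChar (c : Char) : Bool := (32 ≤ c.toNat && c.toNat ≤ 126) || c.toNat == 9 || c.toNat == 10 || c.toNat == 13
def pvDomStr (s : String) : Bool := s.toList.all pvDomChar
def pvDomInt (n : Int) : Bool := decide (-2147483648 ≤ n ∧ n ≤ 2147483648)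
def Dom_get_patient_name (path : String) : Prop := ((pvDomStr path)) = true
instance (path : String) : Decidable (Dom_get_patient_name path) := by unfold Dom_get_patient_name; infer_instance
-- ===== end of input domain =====

-- B replaces A's char-by-char reverse scan (slash counting plus a second reversal loop)
-- by two rfind calls locating the last two slashes and a single slice between them
-- (same O(n), measurably faster by a constant factor: the scan runs inside rfind/slice).

-- ===== PORT A =====
-- first loop of A: for i in range(len(path)-1,-1,-1) with slash counter, break at slash == 2
-- (the index i always lies in range, so the .getD totalization is never exercised)
def pvLoopA (path : String) (idxs : List Int) (slash : Int) (rev : String) : String :=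
  match idxs with
  | [] => rev
  | i :: rest =>
    if PySem.Str.pyGet? path i = some '/' then
      pvLoopA path rest (slash + 1) rev
    else
      let rev' := if slash = 1 then rev.push ((PySem.Str.pyGet? path i).getD ' ') else rev
      if slash = 2 then rev' else pvLoopA path rest slash rev'

-- second loop of A: builds name from reverse_name back to front
def pvLoopRev (s : String) (idxs : List Int) (name : String) : String :=
  match idxs with
  | [] => name
  | i :: rest => pvLoopRev s rest (name.push ((PySem.Str.pyGet? s i).getD ' '))

def get_patient_name (path : String) : String :=
  let reverse_name := pvLoopA path (PySem.List.pyRange (PySem.Str.len path - 1) (-1) (-1)) 0 ""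
  pvLoopRev reverse_name (PySem.List.pyRange (PySem.Str.len reverse_name - 1) (-1) (-1)) ""

-- ===== PORT B =====
def get_patient_name_alt (path : String) : String :=
  let last := PySem.Str.rfind path "/"
  if last = -1 then ""
  else
    let prev := PySem.Str.rfindFrom path "/" 0 (some last)
    PySem.Str.slice path (some (prev + 1)) (some last)

-- ===== PRECONDITION & SPEC =====
def Spec_get_patient_name (path : String) (out : String) : Prop := out = get_patient_name_alt path
instance (path : String) (out : String) : Decidable (Spec_get_patient_name path out) := by unfold Spec_get_patient_name; infer_instance

-- ===== CLAIM (what is proved, stated in full; the proofs are below) =====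
def Claim_equal_get_patient_name : Prop := ∀ (path : String), Dom_get_patient_name path → Spec_get_patient_name path (get_patient_name path)

-- ===== LEMMAS AND PROOFS =====

-- char-level mirror of A's first loop, over the reversed character list
def pvCharLoopA : List Char → Int → List Char → List Char
  | [], _, rev => rev
  | c :: rest, slash, rev =>
    if c = '/' then pvCharLoopA rest (slash + 1) rev
    else
      let rev' := if slash = 1 then rev ++ [c] else rev
      if slash = 2 then rev' else pvCharLoopA rest slash rev'

theorem pvLoopA_eq_char (path : String) (n : Nat) (hn : n ≤ path.toList.length)
    (slash : Int) (rev : String) :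
    pvLoopA path ((PySem.List.pyRange 0 (n : Int) 1).reverse) slash rev
      = String.ofList (pvCharLoopA ((path.toList.take n).reverse) slash rev.toList) := by
  induction n generalizing slash rev with
  | zero => simp [PySem.List.pyRange_one_eq_nil, pvLoopA, pvCharLoopA]
  | succ m ih =>
    have hm : m < path.toList.length := by omega
    have hr : PySem.List.pyRange 0 ((m + 1 : Nat) : Int) 1
        = PySem.List.pyRange 0 (m : Int) 1 ++ [(m : Int)] := by
      push_cast
      exact PySem.List.pyRange_one_succ_right (by positivity)
    have hget : PySem.Str.pyGet? path (m : Int) = some (path.toList[m]) := by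
      simp [List.getElem?_eq_getElem hm]
    have htake : (path.toList.take (m + 1)).reverse
        = path.toList[m] :: (path.toList.take m).reverse := by
      rw [List.take_add_one]
      simp [List.getElem?_eq_getElem hm]
    rw [hr, List.reverse_append, List.reverse_singleton, List.singleton_append, htake,
        pvLoopA, pvCharLoopA, hget]
    by_cases hc : path.toList[m] = '/'
    · simp only [hc, if_true]
      exact ih (by omega) (slash + 1) rev
    · simp only [Option.some.injEq, if_neg hc, Option.getD_some]
      by_cases h2 : slash = 2
      · simp [h2]
      · by_cases h1 : slash = 1 <;>
          simp [h1, h2, ih (by omega : m ≤ path.toList.length)]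

theorem pvLoopRev_eq_rev (s : String) (n : Nat) (hn : n ≤ s.toList.length) (name : String) :
    pvLoopRev s ((PySem.List.pyRange 0 (n : Int) 1).reverse) name
      = String.ofList (name.toList ++ (s.toList.take n).reverse) := by
  induction n generalizing name with
  | zero => simp [PySem.List.pyRange_one_eq_nil, pvLoopRev]
  | succ m ih =>
    have hm : m < s.toList.length := by omega
    have hr : PySem.List.pyRange 0 ((m + 1 : Nat) : Int) 1
        = PySem.List.pyRange 0 (m : Int) 1 ++ [(m : Int)] := by
      push_cast
      exact PySem.List.pyRange_one_succ_right (by positivity)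
    have hget : PySem.Str.pyGet? s (m : Int) = some (s.toList[m]) := by
      simp [List.getElem?_eq_getElem hm]
    have htake : (s.toList.take (m + 1)).reverse
        = s.toList[m] :: (s.toList.take m).reverse := by
      rw [List.take_add_one]
      simp [List.getElem?_eq_getElem hm]
    rw [hr, List.reverse_append, List.reverse_singleton, List.singleton_append,
        pvLoopRev, hget, ih (by omega), htake]
    simp

theorem pvCharLoopA_ge_two (r : List Char) (slash : Int) (rev : List Char) (h : 2 ≤ slash) :
    pvCharLoopA r slash rev = rev := by
  induction r generalizing slash with
  | nil => simp [pvCharLoopA]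
  | cons c rest ih =>
    by_cases hc : c = '/'
    · simp [pvCharLoopA, hc, ih (slash + 1) (by omega)]
    · have h1 : slash ≠ 1 := by omega
      by_cases h2 : slash = 2 <;> simp [pvCharLoopA, hc, h1, h2, ih slash h]

theorem pvCharLoopA_one (r : List Char) (rev : List Char) :
    pvCharLoopA r 1 rev = rev ++ r.takeWhile (· != '/') := by
  induction r generalizing rev with
  | nil => simp [pvCharLoopA]
  | cons c rest ih =>
    by_cases hc : c = '/'
    · simp [pvCharLoopA, hc, pvCharLoopA_ge_two rest 2 rev (by omega)]
    · simp [pvCharLoopA, hc, ih (rev ++ [c])]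

theorem pvCharLoopA_zero (r : List Char) (rev : List Char) :
    pvCharLoopA r 0 rev = rev ++ ((r.dropWhile (· != '/')).tail.takeWhile (· != '/')) := by
  induction r with
  | nil => simp [pvCharLoopA]
  | cons c rest ih =>
    by_cases hc : c = '/'
    · simp [pvCharLoopA, hc, pvCharLoopA_one]
    · simp [pvCharLoopA, hc, ih]

theorem dropWhile_eq_drop_len (l : List Char) (p : Char → Bool) :
    l.dropWhile p = l.drop (l.takeWhile p).length := by
  induction l with
  | nil => simp
  | cons a t ih => by_cases h : p a <;> simp [h, ih]

theorem takeWhile_eq_take_len (l : List Char) (p : Char → Bool) :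
    l.takeWhile p = l.take (l.takeWhile p).length := by
  induction l with
  | nil => simp
  | cons a t ih =>
    by_cases h : p a
    · simp only [List.takeWhile_cons_of_pos h, List.length_cons, List.take_succ_cons]
      exact congrArg _ ih
    · simp [h]

theorem pyRange_countdown (n : Nat) :
    PySem.List.pyRange ((n : Int) - 1) (-1) (-1) = (PySem.List.pyRange 0 (n : Int) 1).reverse := by
  rw [PySem.List.pyRange_neg_one_eq_reverse]
  norm_num

theorem pvSecondLoop (S : List Char) :
    pvLoopRev (String.ofList S)
      (PySem.List.pyRange (PySem.Str.len (String.ofList S) - 1) (-1) (-1)) ""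
      = String.ofList S.reverse := by
  have hlen2 : PySem.Str.len (String.ofList S) = (S.length : Int) := by simp
  rw [hlen2, pyRange_countdown, pvLoopRev_eq_rev (String.ofList S) S.length (by simp) ""]
  simp

theorem get_patient_name_char (path : String) :
    get_patient_name path
      = String.ofList (((path.toList.reverse.dropWhile (· != '/')).tail.takeWhile (· != '/')).reverse) := by
  unfold get_patient_name
  have hlen : PySem.Str.len path = (path.toList.length : Int) := by simp
  rw [hlen, pyRange_countdown, pvLoopA_eq_char path path.toList.length le_rfl 0 ""]
  rw [List.take_length]
  have hnil : ("" : String).toList = ([] : List Char) := rfl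
  rw [hnil, pvCharLoopA_zero, List.nil_append]
  exact pvSecondLoop _

theorem rfind_go_char (l : List Char) (c : Char) (k : Nat) (hk : k < l.length) :
    PySem.Chars.rfind.go l [c] k
      = if c ∈ l.take (k + 1)
        then ((k : Int) - ((l.take (k + 1)).reverse.takeWhile (· != c)).length)
        else -1 := by
  induction k with
  | zero =>
    obtain ⟨a, t, rfl⟩ : ∃ a t, l = a :: t := by
      cases l with
      | nil => simp at hk
      | cons a t => exact ⟨a, t, rfl⟩
    rw [PySem.Chars.rfind.go]
    by_cases hc : c = a <;> simp [List.isPrefixOf, hc]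
  | succ k ih =>
    have hk' : k < l.length := by omega
    have hd : l.drop (k + 1) = l[k + 1] :: l.drop (k + 2) := by
      rw [List.drop_eq_getElem_cons hk]
    have htake : l.take (k + 1 + 1) = l.take (k + 1) ++ [l[k + 1]] := by
      rw [List.take_add_one]
      simp [List.getElem?_eq_getElem hk]
    rw [PySem.Chars.rfind.go, hd, ih hk']
    by_cases hc : l[k + 1] = c
    · simp [List.isPrefixOf, hc, htake]
    · have hne : (c == l[k + 1]) = false := by simp [Ne.symm hc]
      simp only [List.isPrefixOf, hne, Bool.false_and, Bool.false_eq_true, if_false]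
      by_cases hm : c ∈ l.take (k + 1)
      · have hin : c ∈ l.take (k + 1 + 1) := by
          rw [htake]; exact List.mem_append_left _ hm
        rw [if_pos hm, if_pos hin, htake, List.reverse_append, List.reverse_singleton,
          List.singleton_append, List.takeWhile_cons_of_pos (by simp [hc])]
        push_cast
        simp
      · have hnin : c ∉ l.take (k + 1 + 1) := by
          rw [htake]
          intro hmem
          rcases List.mem_append.mp hmem with h | h
          · exact hm h
          · exact hc (List.mem_singleton.mp h).symm
        rw [if_neg hm, if_neg hnin]

theorem rfind_char (l : List Char) (c : Char) :
    PySem.Chars.rfind l [c]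
      = if c ∈ l then ((l.length : Int) - 1 - ((l.reverse.takeWhile (· != c)).length)) else -1 := by
  cases l with
  | nil => simp [PySem.Chars.rfind, PySem.Chars.rfind.go, List.isPrefixOf]
  | cons a t =>
    show PySem.Chars.rfind.go (a :: t) [c] (t.length + 1) = _
    rw [PySem.Chars.rfind.go]
    have hdrop : (a :: t).drop (t.length + 1) = [] := by simp
    rw [hdrop]
    simp only [List.isPrefixOf, Bool.false_eq_true, if_false]
    rw [rfind_go_char _ _ _ (by simp)]
    have htake : (a :: t).take (t.length + 1) = a :: t := by simp
    rw [htake]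
    simp only [List.length_cons]
    split_ifs <;> (push_cast; try omega)

theorem rfindFrom_char (l : List Char) (c : Char) (e : Nat) (he : e ≤ l.length) :
    PySem.Chars.rfindFrom l [c] 0 (some (e : Int)) = PySem.Chars.rfind (l.take e) [c] := by
  unfold PySem.Chars.rfindFrom
  have h1 : ¬ ((l.length : Int) < (e : Int)) := by omega
  have h2 : ¬ ((e : Int) < 0) := by omega
  simp only [h1, if_false, h2, if_neg (lt_irrefl (0 : Int))]
  simp only [Int.toNat_natCast, Int.toNat_zero, List.drop_zero]
  split_ifs with h
  · exact h.symm
  · simp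

theorem takeWhile_lt_of_mem (l : List Char) (h : '/' ∈ l) :
    (l.reverse.takeWhile (· != '/')).length < l.length := by
  have hle : (l.reverse.takeWhile (· != '/')).length ≤ l.length := by
    calc (l.reverse.takeWhile (· != '/')).length ≤ l.reverse.length :=
          (List.takeWhile_prefix _).length_le
      _ = l.length := List.length_reverse
  rcases lt_or_eq_of_le hle with hlt | heq
  · exact hlt
  · exfalso
    have hpre := List.takeWhile_prefix (l := l.reverse) (p := (· != '/'))
    have heqf : l.reverse.takeWhile (· != '/') = l.reverse :=
      hpre.eq_of_length (by rw [heq, List.length_reverse])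
    have hall := List.takeWhile_eq_self_iff.mp heqf
    have : ('/' : Char) ∈ l.reverse := List.mem_reverse.mpr h
    have := hall _ this
    simp at this

theorem get_patient_name_alt_char (path : String) :
    get_patient_name_alt path
      = String.ofList (((path.toList.reverse.dropWhile (· != '/')).tail.takeWhile (· != '/')).reverse) := by
  unfold get_patient_name_alt
  have hconv : ("/" : String).toList = ['/'] := rfl
  rw [PySem.Str.rfind_eq, hconv, rfind_char]
  by_cases hmem : '/' ∈ path.toList
  case neg =>
    rw [if_neg hmem, if_pos rfl]
    have hdw : path.toList.reverse.dropWhile (· != '/') = [] := by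
      rw [List.dropWhile_eq_nil_iff]
      intro x hx
      have : x ∈ path.toList := List.mem_reverse.mp hx
      simp only [bne_iff_ne, ne_eq]
      intro hxe
      exact hmem (hxe ▸ this)
    rw [hdw]
    rfl
  case pos =>
    rw [if_pos hmem]
    obtain ⟨tw, htw⟩ : ∃ tw, (path.toList.reverse.takeWhile (· != '/')).length = tw := ⟨_, rfl⟩
    have htwlt : tw < path.toList.length := htw ▸ takeWhile_lt_of_mem _ hmem
    rw [htw]
    have hne : ¬ ((path.toList.length : Int) - 1 - (tw : Int) = -1) := by omega
    rw [if_neg hne]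
    have hcast : (path.toList.length : Int) - 1 - (tw : Int)
        = ((path.toList.length - 1 - tw : Nat) : Int) := by omega
    obtain ⟨lastN, hlastN⟩ : ∃ m, path.toList.length - 1 - tw = m := ⟨_, rfl⟩
    have hlastle : lastN ≤ path.toList.length := by omega
    rw [hcast, hlastN, PySem.Str.rfindFrom_eq, hconv, rfindFrom_char _ _ _ hlastle, rfind_char]
    -- rewrite the spec side once and for all
    have hS : ((path.toList.reverse.dropWhile (· != '/')).tail.takeWhile (· != '/'))
        = (path.toList.take lastN).reverse.takeWhile (· != '/') := by
      rw [dropWhile_eq_drop_len, htw, List.tail_drop, List.drop_reverse]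
      have heq : path.toList.length - (tw + 1) = lastN := by omega
      rw [heq]
    rw [hS]
    have hmlen : (path.toList.take lastN).length = lastN := by
      rw [List.length_take]
      exact Nat.min_eq_left hlastle
    by_cases hm2 : '/' ∈ path.toList.take lastN
    · rw [if_pos hm2]
      obtain ⟨tw', htw'⟩ : ∃ t, ((path.toList.take lastN).reverse.takeWhile (· != '/')).length = t :=
        ⟨_, rfl⟩
      have htw'lt : tw' < lastN := by
        have := takeWhile_lt_of_mem _ hm2
        omega
      rw [htw', hmlen]
      have hcast2 : (lastN : Int) - 1 - (tw' : Int) + 1 = ((lastN - tw' : Nat) : Int) := by omega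
      change PySem.Str.slice path (some ((lastN : Int) - 1 - (tw' : Int) + 1))
        (some ((lastN : Nat) : Int)) = _
      rw [hcast2]
      apply String.toList_injective
      rw [PySem.Str.toList_slice]
      rw [PySem.Chars.slice_eq_listSlice,
        PySem.List.slice_toNat _ (by omega) (by omega)]
      simp only [Int.toNat_natCast]
      rw [takeWhile_eq_take_len _ (· != '/'), htw', List.take_reverse, List.reverse_reverse,
        hmlen, List.drop_take]
      simp only [String.toList_ofList]
    · rw [if_neg hm2]
      have hall : (path.toList.take lastN).reverse.takeWhile (· != '/')
          = (path.toList.take lastN).reverse := by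
        rw [List.takeWhile_eq_self_iff]
        intro x hx
        have : x ∈ path.toList.take lastN := List.mem_reverse.mp hx
        simp only [bne_iff_ne, ne_eq]
        intro hxe
        exact hm2 (hxe ▸ this)
      rw [hall, List.reverse_reverse]
      change PySem.Str.slice path (some ((-1 : Int) + 1)) (some ((lastN : Nat) : Int)) = _
      apply String.toList_injective
      rw [PySem.Str.toList_slice, PySem.Chars.slice_eq_listSlice]
      have h01 : (-1 : Int) + 1 = ((0 : Nat) : Int) := by omega
      rw [h01, PySem.List.slice_toNat _ (by omega) (by omega)]
      simp

-- ===== VERDICT (by name: the statement is the Claim_ definition above) =====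
theorem get_patient_name_spec : Claim_equal_get_patient_name := by
  intro path _
  unfold Spec_get_patient_name
  rw [get_patient_name_char, get_patient_name_alt_char]
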